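-- pv_equiv track=rewrite | github.com/Wesleycampagna/work_ai____austroloptekus_apharis | HeuristicConstructor.py | generateHeuristic
-- ===== SOURCE A (Python) =====
-- def generateHeuristic(matriz):
-- 	linhasRevisor = len(matriz)
-- 	colunasArtigo = len(matriz[0])
--
-- 	listaResultado = [] # Lista que portara o resultado
--
-- 	for i in range(0, colunasArtigo - 1): # Menos um pq a ultima posicao eh o numero de quantos artigos os corretores corrigem
-- 		maior = matriz[0][i]
-- 		posMaior = 0
-- 		for j in range(1, linhasRevisor):
-- 			if(maior < matriz[j][i]):
-- 				maior = matriz[j][i]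
-- 				posMaior = j
-- 		listaResultado.append(matriz[posMaior][i])
--
-- 	return listaResultado
-- ===== SOURCE B (Python) =====
-- def generateHeuristic(matriz):
-- 	acc = matriz[0][:-1]
-- 	for linha in matriz[1:]:
-- 		acc = [a if a >= x else x for a, x in zip(acc, linha)]
-- 	return acc
-- ===== Notes on version B (the rewrite author's own statement) =====
-- stated objective: alternative
-- what changed: Replaces A's column-by-column argmax scans (running maior/posMaior with nested index loops) by a single row-wise pass that folds an elementwise running-max vector over the rows.
import Mathlib
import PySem

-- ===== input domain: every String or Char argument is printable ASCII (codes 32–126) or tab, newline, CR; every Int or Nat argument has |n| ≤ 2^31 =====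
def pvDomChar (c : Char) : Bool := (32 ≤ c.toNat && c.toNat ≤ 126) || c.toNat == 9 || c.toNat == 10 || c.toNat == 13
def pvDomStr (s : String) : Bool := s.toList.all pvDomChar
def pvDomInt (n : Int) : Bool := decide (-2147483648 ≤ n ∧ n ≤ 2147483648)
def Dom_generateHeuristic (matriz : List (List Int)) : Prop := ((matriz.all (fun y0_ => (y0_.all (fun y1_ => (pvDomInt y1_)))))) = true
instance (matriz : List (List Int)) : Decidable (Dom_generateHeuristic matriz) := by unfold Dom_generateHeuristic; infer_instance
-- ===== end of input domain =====

-- B replaces A's column-by-column argmax scans by one row-wise pass that folds an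
-- elementwise running-max vector over the rows (alternative decomposition, same cost).

-- ===== PORT A =====
-- the inner j-loop: running (maior, posMaior) over rows 1..linhasRevisor-1 for column i
def innerA (matriz : List (List Int)) (linhasRevisor i : Int) : Int × Int :=
  (PySem.List.pyRange 1 linhasRevisor 1).foldl
    (fun (p : Int × Int) j =>
      if p.1 < PySem.List.pyGetD (PySem.List.pyGetD matriz j []) i 0 then
        (PySem.List.pyGetD (PySem.List.pyGetD matriz j []) i 0, j)
      else p)
    (PySem.List.pyGetD (PySem.List.pyGetD matriz 0 []) i 0, 0)

def generateHeuristic (matriz : List (List Int)) : List Int :=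
  let linhasRevisor : Int := matriz.length
  let colunasArtigo : Int := (PySem.List.pyGetD matriz 0 []).length
  (PySem.List.pyRange 0 (colunasArtigo - 1) 1).foldl (fun listaResultado i =>
    listaResultado ++
      [PySem.List.pyGetD (PySem.List.pyGetD matriz (innerA matriz linhasRevisor i).2 []) i 0]) []

-- ===== PORT B =====
-- one elementwise-max step: [a if a >= x else x for a, x in zip(acc, linha)]
def stepB (acc linha : List Int) : List Int :=
  (acc.zip linha).map (fun p => if p.2 ≤ p.1 then p.1 else p.2)

def generateHeuristic_alt (matriz : List (List Int)) : List Int :=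
  (PySem.List.slice matriz (some 1) none).foldl stepB
    (PySem.List.slice (PySem.List.pyGetD matriz 0 []) none (some (-1)))

-- ===== PRECONDITION & SPEC =====
-- Pre_ excludes exactly the inputs on which A raises IndexError: the empty matrix, and
-- matrices with a row shorter than (first-row length − 1), whose columns A indexes.
def Pre_generateHeuristic (matriz : List (List Int)) : Prop :=
  matriz ≠ [] ∧ ∀ r ∈ matriz, (matriz.headD []).length - 1 ≤ r.length
instance (matriz : List (List Int)) : Decidable (Pre_generateHeuristic matriz) := by
  unfold Pre_generateHeuristic; infer_instance
def pvWitness_generateHeuristic : List (List Int) := [[1, 5, 2], [4, 3, 9]]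

def Spec_generateHeuristic (matriz : List (List Int)) (out : List Int) : Prop := out = generateHeuristic_alt matriz
instance (matriz : List (List Int)) (out : List Int) : Decidable (Spec_generateHeuristic matriz out) := by unfold Spec_generateHeuristic; infer_instance

-- ===== CLAIM (what is proved, stated in full; the proofs are below) =====
def Claim_equal_generateHeuristic : Prop := ∀ (matriz : List (List Int)), Dom_generateHeuristic matriz → Pre_generateHeuristic matriz → Spec_generateHeuristic matriz (generateHeuristic matriz)

-- ===== LEMMAS AND PROOFS =====

-- the argmax fold: the value at the tracked position equals the running max
lemma argmax_fold (v : Int → Int) : ∀ (js : List Int) (m p : Int), m = v p →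
    (js.foldl (fun (q : Int × Int) j => if q.1 < v j then (v j, j) else q) (m, p)).1
        = v (js.foldl (fun (q : Int × Int) j => if q.1 < v j then (v j, j) else q) (m, p)).2
    ∧ (js.foldl (fun (q : Int × Int) j => if q.1 < v j then (v j, j) else q) (m, p)).1
        = js.foldl (fun a j => max a (v j)) m := by
  intro js
  induction js with
  | nil => intro m p h; simpa using h
  | cons j t ih =>
    intro m p h
    by_cases hc : m < v j
    · simpa [hc, max_eq_right (le_of_lt hc)] using ih (v j) j rfl
    · simpa [hc, max_eq_left (not_lt.mp hc)] using ih m p h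

-- the inner loop's final value for column k is the running max over the rows' k-entries
lemma innerA_col (r0 : List Int) (rest : List (List Int)) (k : Nat) :
    PySem.List.pyGetD
        (PySem.List.pyGetD (r0 :: rest) (innerA (r0 :: rest) ((r0 :: rest).length : Int) (k : Int)).2 [])
        (k : Int) 0
      = rest.foldl (fun a r => max a (r.getD k 0)) (r0.getD k 0) := by
  unfold innerA
  have h := argmax_fold
    (fun j => PySem.List.pyGetD (PySem.List.pyGetD (r0 :: rest) j []) (k : Int) 0)
    (PySem.List.pyRange 1 (((r0 :: rest).length : Nat) : Int) 1)
    (PySem.List.pyGetD (PySem.List.pyGetD (r0 :: rest) 0 []) (k : Int) 0) 0 rfl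
  simp only [] at h
  rw [← h.1, h.2]
  rw [PySem.List.foldl_pyRange_pyGetD' (r0 :: rest) []
        (fun a r => max a (PySem.List.pyGetD r (k : Int) 0))
        (PySem.List.pyGetD (PySem.List.pyGetD (r0 :: rest) 0 []) (k : Int) 0) (by norm_num)]
  simp [PySem.List.pyGetD_zero_cons, PySem.List.pyGetD_natCast]

-- one elementwise-max step, pointwise
lemma stepB_length (acc r : List Int) (h : acc.length ≤ r.length) :
    (stepB acc r).length = acc.length := by
  simp [stepB, List.length_zip]; omega

lemma stepB_getD (acc r : List Int) (k : Nat) (hk : k < acc.length) (h : acc.length ≤ r.length) :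
    (stepB acc r).getD k 0 = max (acc.getD k 0) (r.getD k 0) := by
  have hk2 : k < r.length := by omega
  have hkz : k < (acc.zip r).length := by simp [List.length_zip]; omega
  rw [List.getD_eq_getElem _ _ (by simpa [stepB, List.length_zip] using hkz),
      List.getD_eq_getElem _ _ hk, List.getD_eq_getElem _ _ hk2]
  simp [stepB]
  split_ifs with h' <;> omega

-- B's row fold computes, per column k, the running max over the rows
lemma fold_cols : ∀ (rs : List (List Int)) (acc : List Int),
    (∀ r ∈ rs, acc.length ≤ r.length) →
    rs.foldl stepB acc
      = (List.range acc.length).map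
          (fun k => rs.foldl (fun a r => max a (r.getD k 0)) (acc.getD k 0)) := by
  intro rs
  induction rs with
  | nil =>
    intro acc _
    simp only [List.foldl_nil]
    apply List.ext_getElem (by simp)
    intro k h1 h2
    simp [List.getD, List.getElem?_eq_getElem h1]
  | cons r rs ih =>
    intro acc hlen
    have hra : acc.length ≤ r.length := hlen r (by simp)
    have hstep : ∀ s ∈ rs, (stepB acc r).length ≤ s.length := by
      intro s hs; rw [stepB_length _ _ hra]; exact hlen s (by simp [hs])
    rw [List.foldl_cons, ih (stepB acc r) hstep, stepB_length _ _ hra]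
    apply List.map_congr_left
    intro k hk
    rw [List.mem_range] at hk
    rw [stepB_getD _ _ _ hk hra]
    simp

theorem generateHeuristic_spec : Claim_equal_generateHeuristic := by
  intro matriz _ hpre
  obtain ⟨hne, hlen⟩ := hpre
  obtain ⟨r0, rest, rfl⟩ : ∃ r0 rest, matriz = r0 :: rest := by
    cases matriz with
    | nil => exact absurd rfl hne
    | cons a b => exact ⟨a, b, rfl⟩
  show generateHeuristic _ = generateHeuristic_alt _
  have hB : generateHeuristic_alt (r0 :: rest)
      = (List.range (r0.length - 1)).map
          (fun k => rest.foldl (fun a r => max a (r.getD k 0)) (r0.getD k 0)) := by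
    unfold generateHeuristic_alt
    rw [PySem.List.slice_from_one, PySem.List.pyGetD_zero_cons, PySem.List.slice_to_neg_one, List.tail_cons]
    rw [fold_cols rest r0.dropLast (by
      intro r hr
      have := hlen r (by simp [hr])
      simp only [List.headD_cons] at this
      simp only [List.length_dropLast]
      omega)]
    simp only [List.length_dropLast]
    apply List.map_congr_left
    intro k hk
    rw [List.mem_range] at hk
    congr 1
    rw [List.getD_eq_getElem _ _ (by simp; omega), List.getD_eq_getElem _ _ (by omega)]
    simp [List.getElem_dropLast]
  rw [hB]
  unfold generateHeuristic
  rw [PySem.List.foldl_append_singleton_eq_map]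
  rw [PySem.List.pyGetD_zero_cons]
  rw [PySem.List.pyRange_one, List.map_map, List.nil_append]
  rw [show ((r0.length : Int) - 1 - 0).toNat = r0.length - 1 by omega]
  apply List.map_congr_left
  intro k _
  simpa using innerA_col r0 rest k
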